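-- pv_equiv track=rewrite | github.com/rakshit2010/ocr_task_solution | app.py | is_blacklisted_suffix
-- ===== SOURCE A (Python) =====
-- SUFFIX_BLACKLIST = {
--     "VENDOR","VEN","ven","vendor", "SELLER", "SHADOWFAX", "FLYER", "RVP", "SHIPPING", "TRACKING", "ORDER",
--     "INVOICE", "ADDRESS", "PHONE", "FAX", "GSTIN"
-- }
--
-- def is_blacklisted_suffix(s):
--     if not s:
--         return False
--     su = s.upper().strip()
--     # direct equality or starts-with a blacklisted word (e.g. 'VENDOR' -> 'VEN' or 'VEND')
--     for bad in SUFFIX_BLACKLIST: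
--         if su == bad:
--             return True
--         # also treat 'VEN', 'VEND' etc derived from 'VENDOR' as blacklisted
--         if bad.startswith(su) or su.startswith(bad[:3]) and bad.startswith(su):
--             return True
--         # if suffix is prefix of a blacklist word (rare), also treat as blacklisted
--         if bad.startswith(su):
--             return True
--     return False
-- ===== SOURCE B (Python) =====
-- SUFFIX_BLACKLIST = {
--     "VENDOR","VEN","ven","vendor", "SELLER", "SHADOWFAX", "FLYER", "RVP", "SHIPPING", "TRACKING", "ORDER",
--     "INVOICE", "ADDRESS", "PHONE", "FAX", "GSTIN"
-- }
--
-- # every prefix (including '' and the full word) of every blacklist word, built once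
-- PREFIXES = {w[:i] for w in SUFFIX_BLACKLIST for i in range(len(w) + 1)}
--
-- def is_blacklisted_suffix(s):
--     if not s:
--         return False
--     return s.upper().strip() in PREFIXES
-- ===== Notes on version B (the rewrite author's own statement) =====
-- stated objective: simpler
-- what changed: A's per-word loop with three redundant startswith/equality clauses is replaced by a single membership test in a set of all prefixes of the blacklist words, precomputed once at module load.
import Mathlib
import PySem

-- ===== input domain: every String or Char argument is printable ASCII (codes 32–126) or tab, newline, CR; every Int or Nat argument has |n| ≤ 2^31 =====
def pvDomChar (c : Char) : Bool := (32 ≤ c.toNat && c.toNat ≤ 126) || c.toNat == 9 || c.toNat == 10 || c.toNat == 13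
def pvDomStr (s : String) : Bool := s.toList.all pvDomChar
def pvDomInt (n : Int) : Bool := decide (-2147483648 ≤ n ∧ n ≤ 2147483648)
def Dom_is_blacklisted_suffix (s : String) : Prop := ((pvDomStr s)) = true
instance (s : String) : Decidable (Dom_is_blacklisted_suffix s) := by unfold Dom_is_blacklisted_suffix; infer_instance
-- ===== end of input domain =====

-- B replaces A's per-word startswith scan (with its redundant boolean clauses) by a single
-- membership test in a precomputed set of all prefixes of the blacklist words (objective: simpler).
-- A iterates over a Python set; the result is order-independent (True iff ANY word matches), so the
-- port iterates the set's elements in literal order, which is faithful.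

-- ===== PORT A =====
def SUFFIX_BLACKLIST : PySem.Set String := PySem.Set.ofList
  ["VENDOR","VEN","ven","vendor","SELLER","SHADOWFAX","FLYER","RVP","SHIPPING","TRACKING","ORDER",
   "INVOICE","ADDRESS","PHONE","FAX","GSTIN"]

def pvLoopA (su : String) : List String → Bool
  | [] => false
  | bad :: rest =>
    if su == bad then true
    else if PySem.Str.startswith bad su
            || (PySem.Str.startswith su (PySem.Str.slice bad none (some 3))
                && PySem.Str.startswith bad su) then true
    else if PySem.Str.startswith bad su then true
    else pvLoopA su rest

def is_blacklisted_suffix (s : String) : Bool :=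
  if s == "" then false
  else pvLoopA (PySem.Str.strip (PySem.Str.upper s)) SUFFIX_BLACKLIST

-- ===== PORT B =====
def PREFIXES : PySem.Set String :=
  PySem.Set.ofList (SUFFIX_BLACKLIST.flatMap (fun w =>
    (PySem.List.pyRange 0 (PySem.Str.len w + 1) 1).map (fun i => PySem.Str.slice w none (some i))))

def is_blacklisted_suffix_alt (s : String) : Bool :=
  if s == "" then false
  else PySem.Set.contains PREFIXES (PySem.Str.strip (PySem.Str.upper s))

-- ===== PRECONDITION & SPEC =====
def Spec_is_blacklisted_suffix (s : String) (out : Bool) : Prop := out = is_blacklisted_suffix_alt s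
instance (s : String) (out : Bool) : Decidable (Spec_is_blacklisted_suffix s out) := by unfold Spec_is_blacklisted_suffix; infer_instance

-- ===== CLAIM (what is proved, stated in full; the proofs are below) =====
def Claim_equal_is_blacklisted_suffix : Prop := ∀ (s : String), Dom_is_blacklisted_suffix s → Spec_is_blacklisted_suffix s (is_blacklisted_suffix s)

-- ===== LEMMAS AND PROOFS =====

-- A's loop condition collapses to "su is a prefix of some blacklist word".
theorem pvLoopA_iff (su : String) (l : List String) :
    pvLoopA su l = true ↔ ∃ w ∈ l, su.toList <+: w.toList := by
  induction l with
  | nil => simp [pvLoopA]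
  | cons bad rest ih =>
    simp only [pvLoopA]
    split_ifs with h1 h2 h3
    · simp only [beq_iff_eq] at h1
      subst h1
      exact ⟨fun _ => ⟨su, by simp⟩, fun _ => rfl⟩
    · constructor
      · intro _
        rcases Bool.or_eq_true_iff.mp h2 with h | h
        · exact ⟨bad, by simp, (PySem.Chars.startswith_iff _ _).mp (by simpa using h)⟩
        · exact ⟨bad, by simp, (PySem.Chars.startswith_iff _ _).mp
            (by simpa using (Bool.and_eq_true_iff.mp h).2)⟩
      · intro _; rfl
    · exact ⟨fun _ => ⟨bad, by simp, (PySem.Chars.startswith_iff _ _).mp (by simpa using h3)⟩,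
        fun _ => rfl⟩
    · rw [ih]
      constructor
      · rintro ⟨w, hw, hp⟩; exact ⟨w, by simp [hw], hp⟩
      · rintro ⟨w, hw, hp⟩
        rcases List.mem_cons.mp hw with rfl | hw'
        · exact absurd (by simpa using (PySem.Chars.startswith_iff w.toList su.toList).mpr hp) h3
        · exact ⟨w, hw', hp⟩

-- the i-th prefix slice, seen on the character list
theorem slice_prefix_char (w : String) (i : Nat) :
    (PySem.Str.slice w none (some (i : Int))).toList = w.toList.take i := by
  simp [PySem.List.slice_to_natCast]

-- membership in B's prefix table is exactly "prefix of some blacklist word"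
theorem mem_PREFIXES_iff (su : String) :
    PySem.Set.contains PREFIXES su = true ↔ ∃ w ∈ SUFFIX_BLACKLIST, su.toList <+: w.toList := by
  have h : PySem.Set.contains PREFIXES su = true ↔ su ∈ PREFIXES := by
    simp [PySem.Set.contains]
  rw [h]
  unfold PREFIXES
  rw [PySem.Set.mem_ofList]
  simp only [List.mem_flatMap, List.mem_map]
  constructor
  · rintro ⟨w, hw, i, hi, rfl⟩
    rcases (PySem.List.mem_pyRange_one).mp hi with ⟨h0, _⟩
    refine ⟨w, hw, ?_⟩
    obtain ⟨n, rfl⟩ : ∃ n : Nat, i = (n : Int) := ⟨i.toNat, (Int.toNat_of_nonneg h0).symm⟩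
    rw [slice_prefix_char]
    exact List.take_prefix n w.toList
  · rintro ⟨w, hw, hp⟩
    refine ⟨w, hw, (su.toList.length : Int), ?_, ?_⟩
    · rw [PySem.List.mem_pyRange_one]
      have := hp.length_le
      have hlen : PySem.Str.len w = (w.toList.length : Int) := by
        simp [PySem.Str.len_eq]
      constructor
      · omega
      · omega
    · apply String.toList_inj.mp
      rw [slice_prefix_char]
      exact ((List.prefix_iff_eq_take).mp hp).symm

theorem body_eq (su : String) :
    pvLoopA su SUFFIX_BLACKLIST = PySem.Set.contains PREFIXES su := by
  rw [Bool.eq_iff_iff, pvLoopA_iff, mem_PREFIXES_iff]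

-- ===== VERDICT (by name: the statement is the Claim_ definition above) =====
theorem is_blacklisted_suffix_spec : Claim_equal_is_blacklisted_suffix := by
  intro s _
  unfold Spec_is_blacklisted_suffix is_blacklisted_suffix is_blacklisted_suffix_alt
  split_ifs with h
  · rfl
  · exact body_eq _
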